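-- pv_equiv track=rewrite | github.com/sakshigujar26/PythonLab | style.py | change_zigzagcase
-- ===== SOURCE A (Python) =====
-- def change_zigzagcase(text):
--     result = ''
--     for i, char in enumerate(text):
--         if i % 2 == 0:
--             if 'a' <= char <= 'z':
--                 result += chr(ord(char) - 32)
--             else:
--                 result += char
--         else:
--             if 'A' <= char <= 'Z':
--                 result += chr(ord(char) + 32)
--             else:
--                 result += char
--     return result
-- ===== SOURCE B (Python) =====
-- def _up(c):
--     return chr(ord(c) - 32) if 'a' <= c <= 'z' else c
--
-- def _lo(c):
--     return chr(ord(c) + 32) if 'A' <= c <= 'Z' else c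
--
-- def change_zigzagcase(text):
--     out = []
--     it = iter(text)
--     for a in it:
--         out.append(_up(a))
--         b = next(it, None)
--         if b is None:
--             break
--         out.append(_lo(b))
--     return ''.join(out)
-- ===== Notes on version B (the rewrite author's own statement) =====
-- stated objective: alternative
-- what changed: Replaced the enumerate loop with an index-parity test by an index-free iterator pass that consumes two characters per step (uppercase the first, lowercase the second), so no counter or parity check exists.
import Mathlib
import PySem

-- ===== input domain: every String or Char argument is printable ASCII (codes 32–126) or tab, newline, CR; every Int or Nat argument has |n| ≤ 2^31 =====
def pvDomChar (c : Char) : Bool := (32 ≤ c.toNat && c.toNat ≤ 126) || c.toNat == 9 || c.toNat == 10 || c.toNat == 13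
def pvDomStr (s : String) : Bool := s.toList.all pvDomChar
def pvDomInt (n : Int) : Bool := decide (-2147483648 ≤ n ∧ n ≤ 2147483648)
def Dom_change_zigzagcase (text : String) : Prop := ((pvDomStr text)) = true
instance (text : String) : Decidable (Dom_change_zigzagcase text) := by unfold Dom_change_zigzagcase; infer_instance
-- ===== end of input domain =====

-- B replaces A's indexed loop with parity test by an index-free two-characters-at-a-time pass (alternative decomposition, same cost).
-- Strings are modeled as their code-point lists; 'result += ch' is acc ++ [ch].

-- ===== PORT A =====
def change_zigzagcase (text : String) : String :=
  String.ofList <|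
    (PySem.List.enumerate text.toList 0).foldl
      (fun (result : List Char) (p : Int × Char) =>
        if PySem.Int.mod p.1 2 = 0 then
          if 'a' ≤ p.2 ∧ p.2 ≤ 'z' then result ++ [Char.ofNat (p.2.toNat - 32)]
          else result ++ [p.2]
        else
          if 'A' ≤ p.2 ∧ p.2 ≤ 'Z' then result ++ [Char.ofNat (p.2.toNat + 32)]
          else result ++ [p.2]) []

-- ===== PORT B =====
def pvUp (c : Char) : Char := if 'a' ≤ c ∧ c ≤ 'z' then Char.ofNat (c.toNat - 32) else c

def pvLo (c : Char) : Char := if 'A' ≤ c ∧ c ≤ 'Z' then Char.ofNat (c.toNat + 32) else c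

def pvZig : List Char → List Char
  | [] => []
  | [c] => [pvUp c]
  | c :: d :: rest => pvUp c :: pvLo d :: pvZig rest

def change_zigzagcase_alt (text : String) : String :=
  String.ofList (pvZig text.toList)

-- ===== PRECONDITION & SPEC =====
def Spec_change_zigzagcase (text : String) (out : String) : Prop := out = change_zigzagcase_alt text
instance (text : String) (out : String) : Decidable (Spec_change_zigzagcase text out) := by unfold Spec_change_zigzagcase; infer_instance

-- ===== CLAIM (what is proved, stated in full; the proofs are below) =====
def Claim_equal_change_zigzagcase : Prop := ∀ (text : String), Dom_change_zigzagcase text → Spec_change_zigzagcase text (change_zigzagcase text)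

-- ===== LEMMAS AND PROOFS =====

-- A's fold body, named for the proofs below (definitionally the lambda in the port).
def pvStepA (result : List Char) (p : Int × Char) : List Char :=
  if PySem.Int.mod p.1 2 = 0 then
    if 'a' ≤ p.2 ∧ p.2 ≤ 'z' then result ++ [Char.ofNat (p.2.toNat - 32)]
    else result ++ [p.2]
  else
    if 'A' ≤ p.2 ∧ p.2 ≤ 'Z' then result ++ [Char.ofNat (p.2.toNat + 32)]
    else result ++ [p.2]

lemma mod_two_mul (k : Int) : PySem.Int.mod (2 * k) 2 = 0 := by
  simp [PySem.Int.mod]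

lemma mod_two_mul_add_one (k : Int) : PySem.Int.mod (2 * k + 1) 2 ≠ 0 := by
  simp [PySem.Int.mod]

lemma stepA_even (result : List Char) (k : Int) (c : Char) :
    pvStepA result (2 * k, c) = result ++ [pvUp c] := by
  unfold pvStepA pvUp
  rw [if_pos (mod_two_mul k)]
  split_ifs <;> rfl

lemma stepA_odd (result : List Char) (k : Int) (c : Char) :
    pvStepA result (2 * k + 1, c) = result ++ [pvLo c] := by
  unfold pvStepA pvLo
  rw [if_neg (mod_two_mul_add_one k)]
  split_ifs <;> rfl

lemma fold_enum_eq_zig (s : List Char) : ∀ (k : Int) (acc : List Char),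
    (PySem.List.enumerate s (2 * k)).foldl pvStepA acc = acc ++ pvZig s := by
  induction s using pvZig.induct with
  | case1 => intro k acc; simp [PySem.List.enumerate_nil, pvZig]
  | case2 c =>
      intro k acc
      simp [PySem.List.enumerate_cons, PySem.List.enumerate_nil, pvZig, stepA_even]
  | case3 c d rest ih =>
      intro k acc
      have h2 : (2 : Int) * k + 1 + 1 = 2 * (k + 1) := by ring
      simp only [PySem.List.enumerate_cons, List.foldl_cons, stepA_even, stepA_odd, h2,
        ih (k + 1), pvZig]
      simp

-- ===== VERDICT (by name: the statement is the Claim_ definition above) =====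
theorem change_zigzagcase_spec : Claim_equal_change_zigzagcase := by
  intro text _
  show change_zigzagcase text = change_zigzagcase_alt text
  unfold change_zigzagcase change_zigzagcase_alt
  have h : List.foldl pvStepA [] (PySem.List.enumerate text.toList 0) = pvZig text.toList := by
    simpa using fold_enum_eq_zig text.toList 0 []
  exact congrArg String.ofList h
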